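-- pv_equiv track=rewrite | github.com/Wojti-7/logia | Inne/liczby_czterocyfrowe.py | przebieg2
-- ===== SOURCE A (Python) =====
-- def przebieg2(n):
--     b = str(n)
--     w = [''] * len(b)
--     for i in range(0, len(b), 1):
--         w[i] = w[i] + b[i]
--     w.sort(reverse=True)
--     k = ''
--     for i in range(0, len(w), 1):
--         k = k + w[i]
--     w.sort()
--     l = ''
--     for i in range(0, len(w), 1):
--         l = l + w[i]
--     d = int(k) - int(l)
--     return(d)
-- ===== SOURCE B (Python) =====
-- def przebieg2(n):
--     counts = {}
--     for c in str(n):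
--         counts[c] = counts.get(c, 0) + 1
--     desc = ''.join(d * counts.get(d, 0) for d in "9876543210")
--     asc = ''.join(d * counts.get(d, 0) for d in "0123456789")
--     return int(desc) - int(asc)
-- ===== Notes on version B (the rewrite author's own statement) =====
-- stated objective: idiomatic
-- what changed: B replaces A's build-a-list-of-singleton-strings + two in-place sorts + index-concatenation loops with a counting sort: one pass tallies the digit characters of str(n) into a dict, then the descending and ascending strings are emitted directly from the counts.
import Mathlib
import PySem

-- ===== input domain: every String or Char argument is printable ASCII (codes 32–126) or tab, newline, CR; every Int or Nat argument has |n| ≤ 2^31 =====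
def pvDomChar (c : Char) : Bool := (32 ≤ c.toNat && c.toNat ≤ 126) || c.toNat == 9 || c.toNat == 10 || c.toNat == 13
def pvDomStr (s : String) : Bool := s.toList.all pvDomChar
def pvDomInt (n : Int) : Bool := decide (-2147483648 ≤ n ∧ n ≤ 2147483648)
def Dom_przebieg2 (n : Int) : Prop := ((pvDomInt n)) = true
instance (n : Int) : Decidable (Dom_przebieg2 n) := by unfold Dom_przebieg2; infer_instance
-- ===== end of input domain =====

-- B replaces A's sort-the-singleton-strings approach with a one-pass digit counting sort (idiomatic, not timed faster).
-- ===== PORT A =====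
def przebieg2 (n : Int) : Int :=
  let b := PySem.Int.toChars n
  let w0 : List (List Char) := List.replicate b.length []
  let w := (PySem.List.pyRange 0 b.length).foldl
      (fun w i => w.set i.toNat (PySem.List.pyGetD w i [] ++ [PySem.List.pyGetD b i ' '])) w0
  let w1 := PySem.List.sorted w (fun x => x) true
  let k := (PySem.List.pyRange 0 (PySem.List.len w1)).foldl
      (fun k i => k ++ PySem.List.pyGetD w1 i []) []
  let w2 := PySem.List.sorted w1 (fun x => x) false
  let l := (PySem.List.pyRange 0 (PySem.List.len w2)).foldl
      (fun l i => l ++ PySem.List.pyGetD w2 i []) []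
  match PySem.Int.ofChars? k, PySem.Int.ofChars? l with
  | some a, some c => a - c
  | _, _ => 0    -- Python raises ValueError here; excluded by Pre_przebieg2

-- ===== PORT B =====
def przebieg2_alt (n : Int) : Int :=
  let s := PySem.Int.toChars n
  let counts := s.foldl (fun d c => d.modify c 0 (· + 1)) (PySem.Dict.empty : PySem.Dict Char Int)
  let desc := ("9876543210".toList).foldl
      (fun acc d => acc ++ List.replicate (counts.getD d 0).toNat d) []
  let asc := ("0123456789".toList).foldl
      (fun acc d => acc ++ List.replicate (counts.getD d 0).toNat d) []
  match PySem.Int.ofChars? desc with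
  | none => 0    -- unreachable: desc/asc are nonempty digit strings
  | some a =>
    match PySem.Int.ofChars? asc with
    | none => 0
    | some c => a - c

-- ===== PRECONDITION & SPEC =====
-- Pre_ excludes negative n: there str(n) contains '-', the sorted string is not a valid int literal
-- and A raises ValueError (returns no value).
def Pre_przebieg2 (n : Int) : Prop := 0 ≤ n
instance (n : Int) : Decidable (Pre_przebieg2 n) := by unfold Pre_przebieg2; infer_instance
def pvWitness_przebieg2 : Int := 3021

def Spec_przebieg2 (n : Int) (out : Int) : Prop := out = przebieg2_alt n
instance (n : Int) (out : Int) : Decidable (Spec_przebieg2 n out) := by unfold Spec_przebieg2; infer_instance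

-- ===== CLAIM (what is proved, stated in full; the proofs are below) =====
def Claim_equal_przebieg2 : Prop := ∀ (n : Int), Dom_przebieg2 n → Pre_przebieg2 n → Spec_przebieg2 n (przebieg2 n)

-- ===== LEMMAS AND PROOFS =====

def pvDA : List Char := ['0','1','2','3','4','5','6','7','8','9']
def pvDD : List Char := ['9','8','7','6','5','4','3','2','1','0']
def pvAsc (s : List Char) : List Char := pvDA.flatMap (fun d => List.replicate (s.count d) d)
def pvDesc (s : List Char) : List Char := pvDD.flatMap (fun d => List.replicate (s.count d) d)

theorem pvCharEq {c d : Char} (h : c.toNat = d.toNat) : c = d :=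
  Char.ext (UInt32.toNat_inj.mp h)

theorem pvMemDA {c : Char} (h : c.isDigit = true) : c ∈ pvDA := by
  simp [Char.isDigit] at h
  have h10 : c.toNat = 48 ∨ c.toNat = 49 ∨ c.toNat = 50 ∨ c.toNat = 51 ∨ c.toNat = 52 ∨
      c.toNat = 53 ∨ c.toNat = 54 ∨ c.toNat = 55 ∨ c.toNat = 56 ∨ c.toNat = 57 := by
    have h1 : 48 ≤ c.toNat := h.1
    have h2 : c.toNat ≤ 57 := h.2
    omega
  unfold pvDA
  rcases h10 with h|h|h|h|h|h|h|h|h|h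
  · have : c = '0' := pvCharEq (by rw [h]; decide); simp [this]
  · have : c = '1' := pvCharEq (by rw [h]; decide); simp [this]
  · have : c = '2' := pvCharEq (by rw [h]; decide); simp [this]
  · have : c = '3' := pvCharEq (by rw [h]; decide); simp [this]
  · have : c = '4' := pvCharEq (by rw [h]; decide); simp [this]
  · have : c = '5' := pvCharEq (by rw [h]; decide); simp [this]
  · have : c = '6' := pvCharEq (by rw [h]; decide); simp [this]
  · have : c = '7' := pvCharEq (by rw [h]; decide); simp [this]
  · have : c = '8' := pvCharEq (by rw [h]; decide); simp [this]
  · have : c = '9' := pvCharEq (by rw [h]; decide); simp [this]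

theorem pvDigits_mem {n : Int} (hn : 0 ≤ n) : ∀ c ∈ PySem.Int.toChars n, c ∈ pvDA := by
  intro c hc
  have hrw : PySem.Int.toChars n = Nat.toDigits 10 n.toNat := by
    simp [PySem.Int.toChars, not_lt.2 hn]
  rw [hrw] at hc
  exact pvMemDA (Nat.isDigit_of_mem_toDigits (by norm_num) (by norm_num) hc)

theorem pvCount_flat (ds : List Char) (hnd : ds.Nodup) (s : List Char) (c : Char) :
    (ds.flatMap (fun d => List.replicate (s.count d) d)).count c
      = if c ∈ ds then s.count c else 0 := by
  induction ds with
  | nil => simp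
  | cons d ds ih =>
    simp only [List.flatMap_cons, List.count_append, List.nodup_cons] at *
    rw [ih hnd.2, List.count_replicate]
    by_cases hcd : c = d
    · subst hcd; simp [hnd.1]
    · simp [hcd, Ne.symm hcd]

theorem pvPerm_flat (ds : List Char) (hnd : ds.Nodup) (s : List Char)
    (hs : ∀ c ∈ s, c ∈ ds) :
    (ds.flatMap (fun d => List.replicate (s.count d) d)).Perm s := by
  rw [List.perm_iff_count]
  intro c
  rw [pvCount_flat ds hnd s c]
  by_cases hc : c ∈ ds
  · simp [hc]
  · simp [hc, List.count_eq_zero.mpr (fun h => hc (hs c h))]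

theorem pvPairwise_flat {R : Char → Char → Prop} (hrefl : ∀ a, R a a)
    (ds : List Char) (hp : ds.Pairwise R) (cnt : Char → Nat) :
    (ds.flatMap (fun d => List.replicate (cnt d) d)).Pairwise R := by
  rw [List.flatMap_def, List.pairwise_flatten]
  refine ⟨?_, ?_⟩
  · intro l hl
    obtain ⟨d, _, rfl⟩ := List.mem_map.mp hl
    exact List.pairwise_replicate.mpr (Or.inr (hrefl d))
  · rw [List.pairwise_map]
    exact hp.imp (fun {a b} h => fun x hx y hy => by
      rw [List.eq_of_mem_replicate hx, List.eq_of_mem_replicate hy]; exact h)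

theorem pvSingle_le {a b : Char} (h : a ≤ b) : ([a] : List Char) ≤ [b] := by
  rcases eq_or_lt_of_le h with rfl | h'
  · exact le_refl _
  · exact le_of_lt (by simp [List.cons_lt_cons_iff]; exact h')

theorem pvSortedInst (w : List (List Char)) (key : List Char → List Char) (rev : Bool) :
    @PySem.List.sorted (List Char) (List Char) List.instLT (fun a b => a.decidableLT b) w key rev
      = @PySem.List.sorted (List Char) (List Char) List.instLinearOrder.toLT LinearOrder.toDecidableLT w key rev := by
  congr 1

theorem pvSortedRev (xs ys : List (List Char)) (hp : ys.Perm xs)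
    (hs : ys.Pairwise (fun a b => b ≤ a)) :
    PySem.List.sorted xs (fun x => x) true = ys := by
  rw [pvSortedInst]
  have h1 := @PySem.List.sorted_perm (List Char) (List Char) List.instLinearOrder.toLT
    LinearOrder.toDecidableLT xs (fun x => x) true
  have h2 := @PySem.List.sorted_pairwise_rev (List Char) (List Char) List.instLinearOrder
    xs (fun x => x)
  exact List.Perm.eq_of_pairwise
    (fun a b _ _ hab hba => le_antisymm hba hab) h2 hs (h1.trans hp.symm)

theorem pvSortedAsc (xs ys : List (List Char)) (hp : ys.Perm xs)
    (hs : ys.Pairwise (fun a b => a ≤ b)) :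
    PySem.List.sorted xs (fun x => x) false = ys := by
  rw [pvSortedInst]
  exact @PySem.List.sorted_id_eq_of_perm_of_pairwise (List Char) List.instLinearOrder xs ys hp hs

theorem pvJoin (w : List (List Char)) :
    (PySem.List.pyRange 0 (PySem.List.len w)).foldl (fun k i => k ++ PySem.List.pyGetD w i []) [] = w.flatten := by
  rw [PySem.List.foldl_append_eq_flatMap, List.flatMap_def, PySem.List.map_pyGetD_pyRange_zero]
  rfl

theorem pvLoopAux (b : List Char) (k : Nat) (hk : k ≤ b.length) :
    (List.range k).foldl (fun w j => w.set j (w.getD j [] ++ [b.getD j ' ']))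
      (List.replicate b.length ([] : List Char))
      = (b.take k).map (fun c => [c]) ++ List.replicate (b.length - k) [] := by
  induction k with
  | zero => simp
  | succ k ih =>
    rw [List.range_succ, List.foldl_append, ih (Nat.le_of_succ_le hk)]
    have hklt : k < b.length := hk
    have hlen : ((b.take k).map (fun c => [c])).length = k := by
      simp [List.length_take, Nat.min_eq_left (Nat.le_of_lt hklt)]
    simp only [List.foldl_cons, List.foldl_nil]
    have hrepl : b.length - k = (b.length - (k+1)) + 1 := by omega
    rw [hrepl, List.replicate_succ]
    have hget : (List.map (fun c => [c]) (List.take k b) ++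
        [] :: List.replicate (b.length - (k+1)) []).getD k [] = [] := by
      rw [List.getD_append_right _ _ _ _ (by omega)]
      simp [Nat.min_eq_left (Nat.le_of_lt hklt)]
    rw [hget, List.set_append_right _ _ (by omega), hlen, Nat.sub_self]
    simp only [List.set_cons_zero, List.nil_append]
    rw [List.getD_eq_getElem _ _ hklt, List.take_add_one, List.getElem?_eq_getElem hklt]
    simp
    rw [List.take_add_one, List.getElem?_eq_getElem
      (show k < (List.map (fun c => [c]) b).length from by simpa using hklt)]
    simp only [List.getElem_map, Option.toList_some, List.append_assoc, List.cons_append,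
      List.nil_append]

theorem pvLoop (b : List Char) :
    (PySem.List.pyRange 0 (b.length : Int)).foldl
      (fun w i => w.set i.toNat (PySem.List.pyGetD w i [] ++ [PySem.List.pyGetD b i ' ']))
      (List.replicate b.length ([] : List Char)) = b.map (fun c => [c]) := by
  rw [PySem.List.pyRange_zero_natCast, List.foldl_map]
  have : ∀ (w : List (List Char)) (j : Nat),
      w.set (Int.toNat j) (PySem.List.pyGetD w (j : Int) [] ++ [PySem.List.pyGetD b (j : Int) ' '])
        = w.set j (w.getD j [] ++ [b.getD j ' ']) := by
    intro w j
    rw [PySem.List.pyGetD_natCast, PySem.List.pyGetD_natCast, Int.toNat_natCast]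
  simp only [this]
  rw [pvLoopAux b b.length le_rfl]
  simp

theorem pvDA_sub_DD : ∀ c : Char, c ∈ pvDA → c ∈ pvDD := by
  intro c h
  fin_cases h <;> decide

theorem pvFlattenMap (l : List Char) : (l.map (fun c => [c])).flatten = l := by
  rw [← List.flatMap_def]
  exact List.flatMap_singleton' l

theorem pvMain (n : Int) (hn : 0 ≤ n) : przebieg2 n = przebieg2_alt n := by
  have hs : ∀ c ∈ PySem.Int.toChars n, c ∈ pvDA := pvDigits_mem hn
  have hsD : ∀ c ∈ PySem.Int.toChars n, c ∈ pvDD := fun c hc => pvDA_sub_DD c (hs c hc)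
  have hperm_desc : (pvDesc (PySem.Int.toChars n)).Perm (PySem.Int.toChars n) :=
    pvPerm_flat pvDD (by decide) _ hsD
  have hperm_asc : (pvAsc (PySem.Int.toChars n)).Perm (PySem.Int.toChars n) :=
    pvPerm_flat pvDA (by decide) _ hs
  have hpw_desc : (pvDesc (PySem.Int.toChars n)).Pairwise (fun a b : Char => b ≤ a) :=
    pvPairwise_flat (R := fun a b : Char => b ≤ a) (fun a => le_refl a) pvDD (by decide) _
  have hpw_asc : (pvAsc (PySem.Int.toChars n)).Pairwise (fun a b : Char => a ≤ b) :=
    pvPairwise_flat (R := fun a b : Char => a ≤ b) (fun a => le_refl a) pvDA (by decide) _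
  have hm_desc : ((pvDesc (PySem.Int.toChars n)).map (fun c => [c])).Pairwise
      (fun a b : List Char => b ≤ a) :=
    List.pairwise_map.mpr (hpw_desc.imp (fun h => pvSingle_le h))
  have hm_asc : ((pvAsc (PySem.Int.toChars n)).map (fun c => [c])).Pairwise
      (fun a b : List Char => a ≤ b) :=
    List.pairwise_map.mpr (hpw_asc.imp (fun h => pvSingle_le h))
  have hcnt : (PySem.Int.toChars n).foldl (fun d c => d.modify c 0 (· + 1))
      (PySem.Dict.empty : PySem.Dict Char Int) = PySem.Dict.counter (PySem.Int.toChars n) := rfl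
  simp only [przebieg2, przebieg2_alt]
  rw [pvLoop]
  rw [pvSortedRev _ _ (hperm_desc.map _) hm_desc]
  rw [pvJoin, pvFlattenMap]
  rw [pvSortedAsc _ _ ((hperm_asc.trans hperm_desc.symm).map _) hm_asc]
  rw [pvJoin, pvFlattenMap]
  rw [hcnt]
  rw [PySem.List.foldl_append_eq_flatMap, PySem.List.foldl_append_eq_flatMap]
  have h9 : "9876543210".toList = pvDD := rfl
  have h0 : "0123456789".toList = pvDA := rfl
  rw [h9, h0]
  simp only [PySem.Dict.getD_counter, Int.toNat_natCast, List.nil_append]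
  have hD : (List.flatMap (fun d => List.replicate (List.count d (PySem.Int.toChars n)) d) pvDD)
      = pvDesc (PySem.Int.toChars n) := rfl
  have hA : (List.flatMap (fun d => List.replicate (List.count d (PySem.Int.toChars n)) d) pvDA)
      = pvAsc (PySem.Int.toChars n) := rfl
  rw [hD, hA]
  rcases PySem.Int.ofChars? (pvDesc (PySem.Int.toChars n)) with _ | a <;>
    rcases PySem.Int.ofChars? (pvAsc (PySem.Int.toChars n)) with _ | c <;> rfl

-- ===== VERDICT (by name: the statement is the Claim_ definition above) =====
theorem przebieg2_spec : Claim_equal_przebieg2 := by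
  intro n _ hpre
  unfold Spec_przebieg2
  exact pvMain n hpre
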